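-- pv_equiv track=rewrite | github.com/ThePostleEffect/lead-pipeline | app/sources/cfpb_complaints.py | _portfolio_subtype
-- ===== SOURCE A (Python) =====
-- def _portfolio_subtype(products: list[str]) -> str:
--     """Infer charged-off portfolio subtype from complaint products."""
--     product_lower = {p.lower() for p in products}
--     if any("vehicle" in p for p in product_lower):
--         return "auto_deficiency"
--     if any("payday" in p or "title" in p for p in product_lower):
--         return "title_loan"
--     if any("credit card" in p for p in product_lower):
--         return "consumer_paper"
--     return "charged_off_general"
-- ===== SOURCE B (Python) =====
-- _LABELS = ["charged_off_general", "consumer_paper", "title_loan", "auto_deficiency"]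
--
--
-- def _rank(pl: str) -> int:
--     """Severity rank of one lowercased product string."""
--     if "vehicle" in pl:
--         return 3
--     if "payday" in pl or "title" in pl:
--         return 2
--     if "credit card" in pl:
--         return 1
--     return 0
--
--
-- def _portfolio_subtype(products: list[str]) -> str:
--     """Infer charged-off portfolio subtype: rank each product, take the max, look up the label."""
--     best = max((_rank(p.lower()) for p in products), default=0)
--     return _LABELS[best]
-- ===== Notes on version B (the rewrite author's own statement) =====
-- stated objective: alternative
-- what changed: Replaced the lowered-set plus priority-ordered any() substring scans by a map-reduce: each product is mapped to a numeric severity rank (vehicle=3, payday/title=2, credit card=1, else 0), the ranks are reduced with max, and the result indexes a label table.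
import Mathlib
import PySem

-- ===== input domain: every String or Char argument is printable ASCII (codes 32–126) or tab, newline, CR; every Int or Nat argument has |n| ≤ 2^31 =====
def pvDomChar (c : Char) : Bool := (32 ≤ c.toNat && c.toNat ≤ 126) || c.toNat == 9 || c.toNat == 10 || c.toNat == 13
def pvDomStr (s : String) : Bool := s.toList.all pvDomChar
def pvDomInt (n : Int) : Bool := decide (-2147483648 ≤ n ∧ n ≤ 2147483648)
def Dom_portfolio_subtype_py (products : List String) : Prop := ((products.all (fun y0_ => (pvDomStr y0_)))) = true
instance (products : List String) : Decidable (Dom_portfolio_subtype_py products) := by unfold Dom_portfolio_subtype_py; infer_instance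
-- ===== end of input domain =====

-- B replaces A's lowered-set plus priority-ordered any() scans by a map-reduce: rank each product, max-reduce, index a label table; objective: alternative.

-- ===== PORT A =====
def portfolio_subtype_py (products : List String) : String :=
  let product_lower : PySem.Set String := PySem.Set.ofList (products.map PySem.Str.lower)
  if product_lower.any (fun p => PySem.Str.isIn "vehicle" p) then "auto_deficiency"
  else if product_lower.any (fun p => PySem.Str.isIn "payday" p || PySem.Str.isIn "title" p) then "title_loan"
  else if product_lower.any (fun p => PySem.Str.isIn "credit card" p) then "consumer_paper"
  else "charged_off_general"

-- ===== PORT B =====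
def pvLabels : List String := ["charged_off_general", "consumer_paper", "title_loan", "auto_deficiency"]

def pvRank (pl : String) : Nat :=
  if PySem.Str.isIn "vehicle" pl then 3
  else if PySem.Str.isIn "payday" pl || PySem.Str.isIn "title" pl then 2
  else if PySem.Str.isIn "credit card" pl then 1
  else 0

def portfolio_subtype_py_alt (products : List String) : String :=
  let best := products.foldl (fun acc p => max acc (pvRank (PySem.Str.lower p))) 0
  pvLabels.getD best ""

-- ===== PRECONDITION & SPEC =====
def Spec_portfolio_subtype_py (products : List String) (out : String) : Prop := out = portfolio_subtype_py_alt products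
instance (products : List String) (out : String) : Decidable (Spec_portfolio_subtype_py products out) := by unfold Spec_portfolio_subtype_py; infer_instance

-- ===== CLAIM (what is proved, stated in full; the proofs are below) =====
def Claim_equal_portfolio_subtype_py : Prop := ∀ (products : List String), Dom_portfolio_subtype_py products → Spec_portfolio_subtype_py products (portfolio_subtype_py products)

-- ===== LEMMAS AND PROOFS =====

-- any over the deduplicated lowered set equals any over the original lowered list
theorem pv_any_ofList (xs : List String) (q : String → Bool) :
    (PySem.Set.ofList xs).any q = xs.any q := by
  by_cases h : ∃ x ∈ xs, q x = true
  · obtain ⟨x, hx, hq⟩ := h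
    have h1 : (PySem.Set.ofList xs).any q = true :=
      List.any_eq_true.mpr ⟨x, ((PySem.Set.mem_ofList _ _).mpr hx), hq⟩
    have h2 : xs.any q = true := List.any_eq_true.mpr ⟨x, hx, hq⟩
    rw [h1, h2]
  · have h1 : (PySem.Set.ofList xs).any q = false := by
      rw [List.any_eq_false]
      intro x hx hq
      exact h ⟨x, ((PySem.Set.mem_ofList _ _).mp hx), hq⟩
    have h2 : xs.any q = false := by
      rw [List.any_eq_false]
      intro x hx hq
      exact h ⟨x, hx, hq⟩
    rw [h1, h2]

-- one step of the max-reduction, over abstract booleans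
theorem pv_step (v t c V T C : Bool) (a : Nat) :
    max (max a (if v then 3 else if t then 2 else if c then 1 else 0))
        (if V then 3 else if T then 2 else if C then 1 else 0)
    = max a (if v || V then 3 else if t || T then 2 else if c || C then 1 else 0) := by
  cases v <;> cases t <;> cases c <;> cases V <;> cases T <;> cases C <;> simp

-- the max-reduction as characterized by the three any's
theorem pv_fold_max (products : List String) (a : Nat) :
    products.foldl (fun acc p => max acc (pvRank (PySem.Str.lower p))) a
    = max a
      (if products.any (fun p => PySem.Str.isIn "vehicle" (PySem.Str.lower p)) then 3
       else if products.any (fun p => PySem.Str.isIn "payday" (PySem.Str.lower p) || PySem.Str.isIn "title" (PySem.Str.lower p)) then 2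
       else if products.any (fun p => PySem.Str.isIn "credit card" (PySem.Str.lower p)) then 1
       else 0) := by
  induction products generalizing a with
  | nil => simp
  | cons x xs ih =>
    rw [List.foldl_cons, ih]
    simp only [List.any_cons, pvRank]
    exact pv_step _ _ _ _ _ _ _

-- ===== VERDICT (by name: the statement is the Claim_ definition above) =====
theorem portfolio_subtype_py_spec : Claim_equal_portfolio_subtype_py := by
  intro products _
  show portfolio_subtype_py products = portfolio_subtype_py_alt products
  unfold portfolio_subtype_py portfolio_subtype_py_alt
  simp only [pv_any_ofList, List.any_map, Function.comp_def, pv_fold_max, Nat.zero_max, pvLabels]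
  split_ifs <;> rfl
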